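-- pv_equiv track=rewrite | github.com/gordonbowe18/code_wars | count_page_numbers/answer/answer.py | page_digits
-- ===== SOURCE A (Python) =====
-- def page_digits(pages):
--     #Sort it for those that can't go len-2
--     if pages < 10:
--         x = (range(1, pages + 1))
--         list_for_length = []
--         for i in x:
--             i = str(i)
--             list_for_length.append(len(i))
--         return sum(list_for_length)
--     # and everyone else!
--     else:
--         y = ''
--         length = len(str(pages))
--         l = '9' * (length - 1)
--         y = str(length - 2) + ('8' * (length-2)) + '9'
--         y = int(y)
--         y = y + (((pages - int(l)) * length))
--         return y
-- ===== SOURCE B (Python) =====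
-- def page_digits(pages):
--     # Group pages by digit length: all d-digit pages contribute d digits each.
--     total = 0
--     d = 1
--     while 10 ** (d - 1) <= pages:
--         block = min(pages, 10 ** d - 1) - 10 ** (d - 1) + 1
--         total += d * block
--         d += 1
--     return total
-- ===== Notes on version B (the rewrite author's own statement) =====
-- stated objective: alternative
-- what changed: Replaces A's two-branch closed form (a per-page string-length loop for single-digit page counts, and otherwise a formula built by concatenating and parsing digit strings like int(str(L-2)+'8'*(L-2)+'9')) with a single uniform arithmetic loop over digit lengths d, adding d times the count of d-digit pages; no string construction or parsing and no branch split.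
import Mathlib
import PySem

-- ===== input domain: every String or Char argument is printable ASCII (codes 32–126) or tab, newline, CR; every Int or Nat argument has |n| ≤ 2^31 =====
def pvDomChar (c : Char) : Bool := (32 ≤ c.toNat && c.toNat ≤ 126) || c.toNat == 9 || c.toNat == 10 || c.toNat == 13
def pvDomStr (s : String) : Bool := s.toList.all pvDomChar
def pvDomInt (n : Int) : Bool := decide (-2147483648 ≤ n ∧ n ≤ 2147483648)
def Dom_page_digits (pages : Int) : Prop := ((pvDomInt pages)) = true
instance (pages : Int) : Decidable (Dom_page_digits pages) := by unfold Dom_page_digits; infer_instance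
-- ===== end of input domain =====

-- B replaces A's string-building closed form with one uniform arithmetic loop over digit lengths (alternative; same asymptotic cost).

-- ===== PORT A =====
def page_digits (pages : Int) : Int :=
  if pages < 10 then
    let x := PySem.List.pyRange 1 (pages + 1) 1
    let list_for_length := x.foldl (fun acc i => acc ++ [PySem.List.len (PySem.Int.toChars i)]) ([] : List Int)
    list_for_length.sum
  else
    let length := PySem.List.len (PySem.Int.toChars pages)
    let l := PySem.List.pyRepeat ['9'] (length - 1)
    let y := PySem.Int.toChars (length - 2) ++ PySem.List.pyRepeat ['8'] (length - 2) ++ ['9']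
    -- int(y) / int(l): both are nonempty digit strings here, so int() never raises; getD 0 is unreachable
    let y2 := (PySem.Int.ofChars? y).getD 0
    y2 + ((pages - (PySem.Int.ofChars? l).getD 0) * length)

-- ===== PORT B =====
-- Source B's while-loop over digit lengths d (condition 10**(d-1) <= pages); fuel only makes the
-- recursion structural: the loop runs at most pages.toNat iterations (10^(d-1) ≥ d), so the fuel never runs out.
def pdLoop (fuel : Nat) (pages total : Int) (d : Nat) : Int :=
  match fuel with
  | 0 => total
  | f + 1 =>
    if (10:Int) ^ (d - 1) ≤ pages then
      pdLoop f pages (total + (d : Int) * (min pages ((10:Int) ^ d - 1) - (10:Int) ^ (d - 1) + 1)) (d + 1)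
    else total

def page_digits_alt (pages : Int) : Int := pdLoop (pages.toNat + 1) pages 0 1

-- ===== PRECONDITION & SPEC =====
def Spec_page_digits (pages : Int) (out : Int) : Prop := out = page_digits_alt pages
instance (pages : Int) (out : Int) : Decidable (Spec_page_digits pages out) := by unfold Spec_page_digits; infer_instance

-- ===== CLAIM (what is proved, stated in full; the proofs are below) =====
def Claim_equal_page_digits : Prop := ∀ (pages : Int), Dom_page_digits pages → Spec_page_digits pages (page_digits pages)

-- ===== LEMMAS AND PROOFS =====

-- Nat.toDigitsCore produces log₁₀ n + 1 digits (Mathlib only has the ≤ direction, toDigitsCore_length).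
lemma tdc_len : ∀ (f n : Nat) (l : List Char), n < 10 ^ (f + 1) →
    (Nat.toDigitsCore 10 (f + 1) n l).length = l.length + Nat.log 10 n + 1 := by
  intro f
  induction f with
  | zero =>
    intro n l h
    have h10 : n / 10 = 0 := Nat.div_eq_of_lt (by simpa using h)
    simp [Nat.toDigitsCore, h10, Nat.log_eq_zero_iff.mpr (Or.inl (by simpa using h))]
  | succ f ih =>
    intro n l h
    by_cases h10 : n / 10 = 0
    · have hn : n < 10 := by omega
      simp [Nat.toDigitsCore, h10, Nat.log_eq_zero_iff.mpr (Or.inl hn)]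
    · have hn : 10 ≤ n := by omega
      have hdiv : n / 10 < 10 ^ (f + 1) := by
        rw [Nat.div_lt_iff_lt_mul (by norm_num)]
        calc n < 10 ^ (f + 1 + 1) := h
        _ = 10 ^ (f + 1) * 10 := by ring
      have hih := ih (n / 10) (Nat.digitChar (n % 10) :: l) hdiv
      rw [show Nat.toDigitsCore 10 (f + 1 + 1) n l
            = Nat.toDigitsCore 10 (f + 1) (n / 10) (Nat.digitChar (n % 10) :: l) by
          simp [Nat.toDigitsCore, h10]]
      rw [hih]
      have hlog : Nat.log 10 (n / 10) = Nat.log 10 n - 1 := Nat.log_div_base 10 n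
      have hpos : 0 < Nat.log 10 n := Nat.log_pos (by norm_num) hn
      simp only [List.length_cons]
      omega

-- len(str(n)) for n ≥ 0 is log₁₀ n + 1
lemma len_toChars (n : Int) (h : 0 ≤ n) :
    PySem.List.len (PySem.Int.toChars n) = ((Nat.log 10 n.toNat : Nat) : Int) + 1 := by
  rw [PySem.Int.toChars, if_neg (by omega)]
  rw [PySem.List.len_eq]
  rw [show Nat.toDigits 10 n.toNat = Nat.toDigitsCore 10 (n.toNat + 1) n.toNat [] from rfl]
  rw [tdc_len n.toNat n.toNat [] (by
    calc n.toNat < 10 ^ n.toNat := Nat.lt_pow_self (by norm_num)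
    _ ≤ 10 ^ (n.toNat + 1) := Nat.pow_le_pow_right (by norm_num) (by omega))]
  simp

lemma pdLoop_stop (fuel : Nat) (pages t : Int) (d : Nat) (h : ¬ (10:Int) ^ (d - 1) ≤ pages) :
    pdLoop fuel pages t d = t := by
  cases fuel <;> simp [pdLoop, h]

lemma pdLoop_step (fuel : Nat) (pages t : Int) (d : Nat) (hf : fuel ≠ 0)
    (h : (10:Int) ^ (d - 1) ≤ pages) :
    pdLoop fuel pages t d =
      pdLoop (fuel - 1) pages (t + (d : Int) * (min pages ((10:Int) ^ d - 1) - (10:Int) ^ (d - 1) + 1)) (d + 1) := by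
  cases fuel with
  | zero => exact absurd rfl hf
  | succ f => simp [pdLoop, h]

lemma pd_small (pages : Int) (h : pages < 10) : page_digits pages = page_digits_alt pages := by
  by_cases h0 : pages < 1
  · rw [page_digits, if_pos h, page_digits_alt, pdLoop_stop _ _ _ _ (by norm_num; omega),
        PySem.List.pyRange_one_eq_nil (by omega)]
    simp
  · interval_cases pages <;> decide
lemma pd_case_2 (pages : Int) (h1 : 10 ≤ pages) (h2 : pages < 100) :
    page_digits pages = page_digits_alt pages := by
  have hlen : PySem.List.len (PySem.Int.toChars pages) = 2 := by
    rw [len_toChars pages (by omega)]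
    rw [show Nat.log 10 pages.toNat = 1 from Nat.log_eq_of_pow_le_of_lt_pow (by norm_num; omega) (by norm_num; omega)]
    norm_num
  rw [page_digits, if_neg (by omega)]
  simp only [hlen]
  rw [page_digits_alt]
  rw [pdLoop_step (pages.toNat + 1) pages _ (1) (by omega) (by norm_num; omega)]
  rw [pdLoop_step (pages.toNat + 1 - 1) pages _ (1 + 1) (by omega) (by norm_num; omega)]
  rw [pdLoop_stop _ _ _ _ (by norm_num; omega)]
  have e1 : (PySem.Int.ofChars? (PySem.Int.toChars ((2:Int) - 2) ++ PySem.List.pyRepeat ['8'] ((2:Int) - 2) ++ ['9'])).getD 0 = 9 := by decide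
  have e2 : (PySem.Int.ofChars? (PySem.List.pyRepeat ['9'] ((2:Int) - 1))).getD 0 = 9 := by decide
  rw [e1, e2]
  push_cast
  norm_num
  omega

lemma pd_case_3 (pages : Int) (h1 : 100 ≤ pages) (h2 : pages < 1000) :
    page_digits pages = page_digits_alt pages := by
  have hlen : PySem.List.len (PySem.Int.toChars pages) = 3 := by
    rw [len_toChars pages (by omega)]
    rw [show Nat.log 10 pages.toNat = 2 from Nat.log_eq_of_pow_le_of_lt_pow (by norm_num; omega) (by norm_num; omega)]
    norm_num
  rw [page_digits, if_neg (by omega)]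
  simp only [hlen]
  rw [page_digits_alt]
  rw [pdLoop_step (pages.toNat + 1) pages _ (1) (by omega) (by norm_num; omega)]
  rw [pdLoop_step (pages.toNat + 1 - 1) pages _ (1 + 1) (by omega) (by norm_num; omega)]
  rw [pdLoop_step (pages.toNat + 1 - 1 - 1) pages _ (1 + 1 + 1) (by omega) (by norm_num; omega)]
  rw [pdLoop_stop _ _ _ _ (by norm_num; omega)]
  have e1 : (PySem.Int.ofChars? (PySem.Int.toChars ((3:Int) - 2) ++ PySem.List.pyRepeat ['8'] ((3:Int) - 2) ++ ['9'])).getD 0 = 189 := by decide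
  have e2 : (PySem.Int.ofChars? (PySem.List.pyRepeat ['9'] ((3:Int) - 1))).getD 0 = 99 := by decide
  rw [e1, e2]
  push_cast
  norm_num
  omega

lemma pd_case_4 (pages : Int) (h1 : 1000 ≤ pages) (h2 : pages < 10000) :
    page_digits pages = page_digits_alt pages := by
  have hlen : PySem.List.len (PySem.Int.toChars pages) = 4 := by
    rw [len_toChars pages (by omega)]
    rw [show Nat.log 10 pages.toNat = 3 from Nat.log_eq_of_pow_le_of_lt_pow (by norm_num; omega) (by norm_num; omega)]
    norm_num
  rw [page_digits, if_neg (by omega)]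
  simp only [hlen]
  rw [page_digits_alt]
  rw [pdLoop_step (pages.toNat + 1) pages _ (1) (by omega) (by norm_num; omega)]
  rw [pdLoop_step (pages.toNat + 1 - 1) pages _ (1 + 1) (by omega) (by norm_num; omega)]
  rw [pdLoop_step (pages.toNat + 1 - 1 - 1) pages _ (1 + 1 + 1) (by omega) (by norm_num; omega)]
  rw [pdLoop_step (pages.toNat + 1 - 1 - 1 - 1) pages _ (1 + 1 + 1 + 1) (by omega) (by norm_num; omega)]
  rw [pdLoop_stop _ _ _ _ (by norm_num; omega)]
  have e1 : (PySem.Int.ofChars? (PySem.Int.toChars ((4:Int) - 2) ++ PySem.List.pyRepeat ['8'] ((4:Int) - 2) ++ ['9'])).getD 0 = 2889 := by decide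
  have e2 : (PySem.Int.ofChars? (PySem.List.pyRepeat ['9'] ((4:Int) - 1))).getD 0 = 999 := by decide
  rw [e1, e2]
  push_cast
  norm_num
  omega

lemma pd_case_5 (pages : Int) (h1 : 10000 ≤ pages) (h2 : pages < 100000) :
    page_digits pages = page_digits_alt pages := by
  have hlen : PySem.List.len (PySem.Int.toChars pages) = 5 := by
    rw [len_toChars pages (by omega)]
    rw [show Nat.log 10 pages.toNat = 4 from Nat.log_eq_of_pow_le_of_lt_pow (by norm_num; omega) (by norm_num; omega)]
    norm_num
  rw [page_digits, if_neg (by omega)]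
  simp only [hlen]
  rw [page_digits_alt]
  rw [pdLoop_step (pages.toNat + 1) pages _ (1) (by omega) (by norm_num; omega)]
  rw [pdLoop_step (pages.toNat + 1 - 1) pages _ (1 + 1) (by omega) (by norm_num; omega)]
  rw [pdLoop_step (pages.toNat + 1 - 1 - 1) pages _ (1 + 1 + 1) (by omega) (by norm_num; omega)]
  rw [pdLoop_step (pages.toNat + 1 - 1 - 1 - 1) pages _ (1 + 1 + 1 + 1) (by omega) (by norm_num; omega)]
  rw [pdLoop_step (pages.toNat + 1 - 1 - 1 - 1 - 1) pages _ (1 + 1 + 1 + 1 + 1) (by omega) (by norm_num; omega)]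
  rw [pdLoop_stop _ _ _ _ (by norm_num; omega)]
  have e1 : (PySem.Int.ofChars? (PySem.Int.toChars ((5:Int) - 2) ++ PySem.List.pyRepeat ['8'] ((5:Int) - 2) ++ ['9'])).getD 0 = 38889 := by decide
  have e2 : (PySem.Int.ofChars? (PySem.List.pyRepeat ['9'] ((5:Int) - 1))).getD 0 = 9999 := by decide
  rw [e1, e2]
  push_cast
  norm_num
  omega

lemma pd_case_6 (pages : Int) (h1 : 100000 ≤ pages) (h2 : pages < 1000000) :
    page_digits pages = page_digits_alt pages := by
  have hlen : PySem.List.len (PySem.Int.toChars pages) = 6 := by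
    rw [len_toChars pages (by omega)]
    rw [show Nat.log 10 pages.toNat = 5 from Nat.log_eq_of_pow_le_of_lt_pow (by norm_num; omega) (by norm_num; omega)]
    norm_num
  rw [page_digits, if_neg (by omega)]
  simp only [hlen]
  rw [page_digits_alt]
  rw [pdLoop_step (pages.toNat + 1) pages _ (1) (by omega) (by norm_num; omega)]
  rw [pdLoop_step (pages.toNat + 1 - 1) pages _ (1 + 1) (by omega) (by norm_num; omega)]
  rw [pdLoop_step (pages.toNat + 1 - 1 - 1) pages _ (1 + 1 + 1) (by omega) (by norm_num; omega)]
  rw [pdLoop_step (pages.toNat + 1 - 1 - 1 - 1) pages _ (1 + 1 + 1 + 1) (by omega) (by norm_num; omega)]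
  rw [pdLoop_step (pages.toNat + 1 - 1 - 1 - 1 - 1) pages _ (1 + 1 + 1 + 1 + 1) (by omega) (by norm_num; omega)]
  rw [pdLoop_step (pages.toNat + 1 - 1 - 1 - 1 - 1 - 1) pages _ (1 + 1 + 1 + 1 + 1 + 1) (by omega) (by norm_num; omega)]
  rw [pdLoop_stop _ _ _ _ (by norm_num; omega)]
  have e1 : (PySem.Int.ofChars? (PySem.Int.toChars ((6:Int) - 2) ++ PySem.List.pyRepeat ['8'] ((6:Int) - 2) ++ ['9'])).getD 0 = 488889 := by decide
  have e2 : (PySem.Int.ofChars? (PySem.List.pyRepeat ['9'] ((6:Int) - 1))).getD 0 = 99999 := by decide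
  rw [e1, e2]
  push_cast
  norm_num
  omega

lemma pd_case_7 (pages : Int) (h1 : 1000000 ≤ pages) (h2 : pages < 10000000) :
    page_digits pages = page_digits_alt pages := by
  have hlen : PySem.List.len (PySem.Int.toChars pages) = 7 := by
    rw [len_toChars pages (by omega)]
    rw [show Nat.log 10 pages.toNat = 6 from Nat.log_eq_of_pow_le_of_lt_pow (by norm_num; omega) (by norm_num; omega)]
    norm_num
  rw [page_digits, if_neg (by omega)]
  simp only [hlen]
  rw [page_digits_alt]
  rw [pdLoop_step (pages.toNat + 1) pages _ (1) (by omega) (by norm_num; omega)]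
  rw [pdLoop_step (pages.toNat + 1 - 1) pages _ (1 + 1) (by omega) (by norm_num; omega)]
  rw [pdLoop_step (pages.toNat + 1 - 1 - 1) pages _ (1 + 1 + 1) (by omega) (by norm_num; omega)]
  rw [pdLoop_step (pages.toNat + 1 - 1 - 1 - 1) pages _ (1 + 1 + 1 + 1) (by omega) (by norm_num; omega)]
  rw [pdLoop_step (pages.toNat + 1 - 1 - 1 - 1 - 1) pages _ (1 + 1 + 1 + 1 + 1) (by omega) (by norm_num; omega)]
  rw [pdLoop_step (pages.toNat + 1 - 1 - 1 - 1 - 1 - 1) pages _ (1 + 1 + 1 + 1 + 1 + 1) (by omega) (by norm_num; omega)]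
  rw [pdLoop_step (pages.toNat + 1 - 1 - 1 - 1 - 1 - 1 - 1) pages _ (1 + 1 + 1 + 1 + 1 + 1 + 1) (by omega) (by norm_num; omega)]
  rw [pdLoop_stop _ _ _ _ (by norm_num; omega)]
  have e1 : (PySem.Int.ofChars? (PySem.Int.toChars ((7:Int) - 2) ++ PySem.List.pyRepeat ['8'] ((7:Int) - 2) ++ ['9'])).getD 0 = 5888889 := by decide
  have e2 : (PySem.Int.ofChars? (PySem.List.pyRepeat ['9'] ((7:Int) - 1))).getD 0 = 999999 := by decide
  rw [e1, e2]
  push_cast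
  norm_num
  omega

lemma pd_case_8 (pages : Int) (h1 : 10000000 ≤ pages) (h2 : pages < 100000000) :
    page_digits pages = page_digits_alt pages := by
  have hlen : PySem.List.len (PySem.Int.toChars pages) = 8 := by
    rw [len_toChars pages (by omega)]
    rw [show Nat.log 10 pages.toNat = 7 from Nat.log_eq_of_pow_le_of_lt_pow (by norm_num; omega) (by norm_num; omega)]
    norm_num
  rw [page_digits, if_neg (by omega)]
  simp only [hlen]
  rw [page_digits_alt]
  rw [pdLoop_step (pages.toNat + 1) pages _ (1) (by omega) (by norm_num; omega)]
  rw [pdLoop_step (pages.toNat + 1 - 1) pages _ (1 + 1) (by omega) (by norm_num; omega)]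
  rw [pdLoop_step (pages.toNat + 1 - 1 - 1) pages _ (1 + 1 + 1) (by omega) (by norm_num; omega)]
  rw [pdLoop_step (pages.toNat + 1 - 1 - 1 - 1) pages _ (1 + 1 + 1 + 1) (by omega) (by norm_num; omega)]
  rw [pdLoop_step (pages.toNat + 1 - 1 - 1 - 1 - 1) pages _ (1 + 1 + 1 + 1 + 1) (by omega) (by norm_num; omega)]
  rw [pdLoop_step (pages.toNat + 1 - 1 - 1 - 1 - 1 - 1) pages _ (1 + 1 + 1 + 1 + 1 + 1) (by omega) (by norm_num; omega)]
  rw [pdLoop_step (pages.toNat + 1 - 1 - 1 - 1 - 1 - 1 - 1) pages _ (1 + 1 + 1 + 1 + 1 + 1 + 1) (by omega) (by norm_num; omega)]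
  rw [pdLoop_step (pages.toNat + 1 - 1 - 1 - 1 - 1 - 1 - 1 - 1) pages _ (1 + 1 + 1 + 1 + 1 + 1 + 1 + 1) (by omega) (by norm_num; omega)]
  rw [pdLoop_stop _ _ _ _ (by norm_num; omega)]
  have e1 : (PySem.Int.ofChars? (PySem.Int.toChars ((8:Int) - 2) ++ PySem.List.pyRepeat ['8'] ((8:Int) - 2) ++ ['9'])).getD 0 = 68888889 := by decide
  have e2 : (PySem.Int.ofChars? (PySem.List.pyRepeat ['9'] ((8:Int) - 1))).getD 0 = 9999999 := by decide
  rw [e1, e2]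
  push_cast
  norm_num
  omega

lemma pd_case_9 (pages : Int) (h1 : 100000000 ≤ pages) (h2 : pages < 1000000000) :
    page_digits pages = page_digits_alt pages := by
  have hlen : PySem.List.len (PySem.Int.toChars pages) = 9 := by
    rw [len_toChars pages (by omega)]
    rw [show Nat.log 10 pages.toNat = 8 from Nat.log_eq_of_pow_le_of_lt_pow (by norm_num; omega) (by norm_num; omega)]
    norm_num
  rw [page_digits, if_neg (by omega)]
  simp only [hlen]
  rw [page_digits_alt]
  rw [pdLoop_step (pages.toNat + 1) pages _ (1) (by omega) (by norm_num; omega)]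
  rw [pdLoop_step (pages.toNat + 1 - 1) pages _ (1 + 1) (by omega) (by norm_num; omega)]
  rw [pdLoop_step (pages.toNat + 1 - 1 - 1) pages _ (1 + 1 + 1) (by omega) (by norm_num; omega)]
  rw [pdLoop_step (pages.toNat + 1 - 1 - 1 - 1) pages _ (1 + 1 + 1 + 1) (by omega) (by norm_num; omega)]
  rw [pdLoop_step (pages.toNat + 1 - 1 - 1 - 1 - 1) pages _ (1 + 1 + 1 + 1 + 1) (by omega) (by norm_num; omega)]
  rw [pdLoop_step (pages.toNat + 1 - 1 - 1 - 1 - 1 - 1) pages _ (1 + 1 + 1 + 1 + 1 + 1) (by omega) (by norm_num; omega)]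
  rw [pdLoop_step (pages.toNat + 1 - 1 - 1 - 1 - 1 - 1 - 1) pages _ (1 + 1 + 1 + 1 + 1 + 1 + 1) (by omega) (by norm_num; omega)]
  rw [pdLoop_step (pages.toNat + 1 - 1 - 1 - 1 - 1 - 1 - 1 - 1) pages _ (1 + 1 + 1 + 1 + 1 + 1 + 1 + 1) (by omega) (by norm_num; omega)]
  rw [pdLoop_step (pages.toNat + 1 - 1 - 1 - 1 - 1 - 1 - 1 - 1 - 1) pages _ (1 + 1 + 1 + 1 + 1 + 1 + 1 + 1 + 1) (by omega) (by norm_num; omega)]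
  rw [pdLoop_stop _ _ _ _ (by norm_num; omega)]
  have e1 : (PySem.Int.ofChars? (PySem.Int.toChars ((9:Int) - 2) ++ PySem.List.pyRepeat ['8'] ((9:Int) - 2) ++ ['9'])).getD 0 = 788888889 := by decide
  have e2 : (PySem.Int.ofChars? (PySem.List.pyRepeat ['9'] ((9:Int) - 1))).getD 0 = 99999999 := by decide
  rw [e1, e2]
  push_cast
  norm_num
  omega

lemma pd_case_10 (pages : Int) (h1 : 1000000000 ≤ pages) (h2 : pages < 10000000000) :
    page_digits pages = page_digits_alt pages := by
  have hlen : PySem.List.len (PySem.Int.toChars pages) = 10 := by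
    rw [len_toChars pages (by omega)]
    rw [show Nat.log 10 pages.toNat = 9 from Nat.log_eq_of_pow_le_of_lt_pow (by norm_num; omega) (by norm_num; omega)]
    norm_num
  rw [page_digits, if_neg (by omega)]
  simp only [hlen]
  rw [page_digits_alt]
  rw [pdLoop_step (pages.toNat + 1) pages _ (1) (by omega) (by norm_num; omega)]
  rw [pdLoop_step (pages.toNat + 1 - 1) pages _ (1 + 1) (by omega) (by norm_num; omega)]
  rw [pdLoop_step (pages.toNat + 1 - 1 - 1) pages _ (1 + 1 + 1) (by omega) (by norm_num; omega)]
  rw [pdLoop_step (pages.toNat + 1 - 1 - 1 - 1) pages _ (1 + 1 + 1 + 1) (by omega) (by norm_num; omega)]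
  rw [pdLoop_step (pages.toNat + 1 - 1 - 1 - 1 - 1) pages _ (1 + 1 + 1 + 1 + 1) (by omega) (by norm_num; omega)]
  rw [pdLoop_step (pages.toNat + 1 - 1 - 1 - 1 - 1 - 1) pages _ (1 + 1 + 1 + 1 + 1 + 1) (by omega) (by norm_num; omega)]
  rw [pdLoop_step (pages.toNat + 1 - 1 - 1 - 1 - 1 - 1 - 1) pages _ (1 + 1 + 1 + 1 + 1 + 1 + 1) (by omega) (by norm_num; omega)]
  rw [pdLoop_step (pages.toNat + 1 - 1 - 1 - 1 - 1 - 1 - 1 - 1) pages _ (1 + 1 + 1 + 1 + 1 + 1 + 1 + 1) (by omega) (by norm_num; omega)]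
  rw [pdLoop_step (pages.toNat + 1 - 1 - 1 - 1 - 1 - 1 - 1 - 1 - 1) pages _ (1 + 1 + 1 + 1 + 1 + 1 + 1 + 1 + 1) (by omega) (by norm_num; omega)]
  rw [pdLoop_step (pages.toNat + 1 - 1 - 1 - 1 - 1 - 1 - 1 - 1 - 1 - 1) pages _ (1 + 1 + 1 + 1 + 1 + 1 + 1 + 1 + 1 + 1) (by omega) (by norm_num; omega)]
  rw [pdLoop_stop _ _ _ _ (by norm_num; omega)]
  have e1 : (PySem.Int.ofChars? (PySem.Int.toChars ((10:Int) - 2) ++ PySem.List.pyRepeat ['8'] ((10:Int) - 2) ++ ['9'])).getD 0 = 8888888889 := by decide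
  have e2 : (PySem.Int.ofChars? (PySem.List.pyRepeat ['9'] ((10:Int) - 1))).getD 0 = 999999999 := by decide
  rw [e1, e2]
  push_cast
  norm_num
  omega

-- ===== VERDICT (by name: the statement is the Claim_ definition above) =====
theorem page_digits_spec : Claim_equal_page_digits := by
  intro pages hdom
  simp only [Dom_page_digits, pvDomInt, decide_eq_true_eq] at hdom
  show page_digits pages = page_digits_alt pages
  by_cases h1 : pages < 10
  · exact pd_small pages h1
  by_cases c2 : pages < 100
  · exact pd_case_2 pages (by omega) c2
  by_cases c3 : pages < 1000
  · exact pd_case_3 pages (by omega) c3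
  by_cases c4 : pages < 10000
  · exact pd_case_4 pages (by omega) c4
  by_cases c5 : pages < 100000
  · exact pd_case_5 pages (by omega) c5
  by_cases c6 : pages < 1000000
  · exact pd_case_6 pages (by omega) c6
  by_cases c7 : pages < 10000000
  · exact pd_case_7 pages (by omega) c7
  by_cases c8 : pages < 100000000
  · exact pd_case_8 pages (by omega) c8
  by_cases c9 : pages < 1000000000
  · exact pd_case_9 pages (by omega) c9
  exact pd_case_10 pages (by omega) (by omega)
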